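-- pv_equiv track=rewrite | github.com/drcpu-github/witnet-explorer-backend | objects/transaction_pool.py | insert_empty_lists
-- ===== SOURCE A (Python) =====
-- def insert_empty_lists(start_timestamp, stop_timestamp, lst):
--     # Edge case where there are no transactions
--     if len(lst) == 0:
--         interpolated_lst = []
--         timestamp = start_timestamp
--         while stop_timestamp - timestamp > 60:
--             interpolated_lst.append((timestamp + 60, [], []))
--             timestamp += 60
--     # Normal case
--     else:
--         interpolated_lst = []
--         # First check if we need to insert empty lists at the start
--         timestamp = lst[0][0]
--         while timestamp - start_timestamp > 60:
--             interpolated_lst.append((start_timestamp + 60, [], []))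
--             start_timestamp += 60
--         interpolated_lst.append(lst[0])
--
--         # Then loop over the available data and check if we need to interpolate
--         timestamp = interpolated_lst[-1][0]
--         for l in lst[1:]:
--             while l[0] - timestamp > 60:
--                 interpolated_lst.append((timestamp + 60, [], []))
--                 timestamp += 60
--             interpolated_lst.append(l)
--             timestamp = l[0]
--
--         # Last check if we need to append empty lists at the end
--         timestamp = interpolated_lst[-1][0]
--         while stop_timestamp - timestamp > 60:
--             interpolated_lst.append((timestamp + 60, [], []))
--             timestamp += 60
--
--     return interpolated_lst
-- ===== SOURCE B (Python) =====
-- def insert_empty_lists(start_timestamp, stop_timestamp, lst):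
--     # Build the result back-to-front: scan lst right-to-left keeping the
--     # right-hand bound as state, emit each gap's fillers in descending order,
--     # and reverse the accumulated list once at the end.
--     rev = []
--     bound = stop_timestamp
--     for l in reversed(lst):
--         f = l[0] + 60 * ((bound - l[0] - 1) // 60)
--         while f > l[0]:
--             rev.append((f, [], []))
--             f -= 60
--         rev.append(l)
--         bound = l[0]
--     f = start_timestamp + 60 * ((bound - start_timestamp - 1) // 60)
--     while f > start_timestamp:
--         rev.append((f, [], []))
--         f -= 60
--     return rev[::-1]
-- ===== Notes on version B (the rewrite author's own statement) =====
-- stated objective: alternative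
-- what changed: A's three staged forward while-loops plus an empty-list special case are replaced by a back-to-front construction: one right-to-left scan over lst with the right-hand bound as state, each gap's fillers emitted in descending order (top filler found by floor division), and a single reversal at the end; the empty case needs no branch.
import Mathlib
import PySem

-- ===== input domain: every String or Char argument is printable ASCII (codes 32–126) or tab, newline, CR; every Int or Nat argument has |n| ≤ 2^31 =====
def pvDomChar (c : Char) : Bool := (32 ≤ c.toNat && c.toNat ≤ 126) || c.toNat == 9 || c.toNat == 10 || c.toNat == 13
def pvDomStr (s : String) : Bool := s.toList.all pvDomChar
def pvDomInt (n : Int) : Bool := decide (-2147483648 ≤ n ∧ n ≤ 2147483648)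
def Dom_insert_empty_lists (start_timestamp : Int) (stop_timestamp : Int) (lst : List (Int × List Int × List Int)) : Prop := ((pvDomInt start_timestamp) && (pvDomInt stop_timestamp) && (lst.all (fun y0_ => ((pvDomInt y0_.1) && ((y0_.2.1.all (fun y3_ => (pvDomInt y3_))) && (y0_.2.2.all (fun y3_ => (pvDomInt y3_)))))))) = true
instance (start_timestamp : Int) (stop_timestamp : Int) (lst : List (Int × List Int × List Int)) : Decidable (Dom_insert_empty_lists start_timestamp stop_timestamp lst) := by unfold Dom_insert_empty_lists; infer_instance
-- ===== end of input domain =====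

-- B builds the result back-to-front: one right-to-left scan with the right-hand bound as
-- state, fillers emitted descending, one final reversal — no staged loops, no empty-case branch.

-- ===== PORT A =====
-- A's while loops 'while bound - t > 60: append (t+60,[],[]); t += 60' (all three have this shape)
def pvFillUp (bound : Int) (t : Int) : List (Int × List Int × List Int) :=
  if bound - t > 60 then (t + 60, [], []) :: pvFillUp bound (t + 60) else []
termination_by (bound - t).toNat
decreasing_by omega

def insert_empty_lists (start_timestamp : Int) (stop_timestamp : Int) (lst : List (Int × List Int × List Int)) : List (Int × List Int × List Int) :=
  match lst with
  | [] =>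
    -- edge case: fill from start_timestamp toward stop_timestamp
    pvFillUp stop_timestamp start_timestamp
  | h :: rest =>
    -- fill before lst[0] (loop mutating start_timestamp), then append lst[0];
    -- 'interpolated_lst[-1][0]' is the timestamp of the element just appended
    let pre := pvFillUp h.1 start_timestamp ++ [h]
    let st := rest.foldl
      (fun (st : List (Int × List Int × List Int) × Int) l =>
        (st.1 ++ pvFillUp l.1 st.2 ++ [l], l.1)) (pre, h.1)
    st.1 ++ pvFillUp stop_timestamp st.2

-- ===== PORT B =====
-- Source B's descending filler loop 'while f > lo: rev.append((f,[],[])); f -= 60' over accumulator rev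
def pvFillDown (lo : Int) (f : Int) (acc : List (Int × List Int × List Int)) : List (Int × List Int × List Int) :=
  if f > lo then pvFillDown lo (f - 60) (acc ++ [(f, [], [])]) else acc
termination_by (f - lo).toNat
decreasing_by omega

def insert_empty_lists_alt (start_timestamp : Int) (stop_timestamp : Int) (lst : List (Int × List Int × List Int)) : List (Int × List Int × List Int) :=
  -- 'for l in reversed(lst)' over the state (rev, bound)
  let st := lst.reverse.foldl
    (fun (st : List (Int × List Int × List Int) × Int) l =>
      (pvFillDown l.1 (l.1 + 60 * PySem.Int.floordiv (st.2 - l.1 - 1) 60) st.1 ++ [l], l.1))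
    ([], stop_timestamp)
  -- tail fill toward start_timestamp, then 'rev[::-1]'
  (pvFillDown start_timestamp
    (start_timestamp + 60 * PySem.Int.floordiv (st.2 - start_timestamp - 1) 60) st.1).reverse

-- ===== PRECONDITION & SPEC =====
def Spec_insert_empty_lists (start_timestamp : Int) (stop_timestamp : Int) (lst : List (Int × List Int × List Int)) (out : List (Int × List Int × List Int)) : Prop := out = insert_empty_lists_alt start_timestamp stop_timestamp lst
instance (start_timestamp : Int) (stop_timestamp : Int) (lst : List (Int × List Int × List Int)) (out : List (Int × List Int × List Int)) : Decidable (Spec_insert_empty_lists start_timestamp stop_timestamp lst out) := by unfold Spec_insert_empty_lists; infer_instance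

-- ===== CLAIM =====
def Claim_equal_insert_empty_lists : Prop := ∀ (start_timestamp : Int) (stop_timestamp : Int) (lst : List (Int × List Int × List Int)), Dom_insert_empty_lists start_timestamp stop_timestamp lst → Spec_insert_empty_lists start_timestamp stop_timestamp lst (insert_empty_lists start_timestamp stop_timestamp lst)

-- ===== LEMMAS AND PROOFS =====

lemma pvFillDown_acc (lo f : Int) (acc : List (Int × List Int × List Int)) :
    pvFillDown lo f acc = acc ++ pvFillDown lo f [] := by
  by_cases h : f > lo
  · rw [pvFillDown, if_pos h, pvFillDown_acc lo (f - 60) (acc ++ [(f, [], [])])]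
    conv_rhs => rw [pvFillDown, if_pos h, List.nil_append, pvFillDown_acc lo (f - 60) [(f, [], [])]]
    simp
  · rw [pvFillDown, if_neg h, pvFillDown, if_neg h]; simp
termination_by (f - lo).toNat
decreasing_by all_goals omega

-- descending fillers from lo+60*q reversed = ascending fillers from lo
lemma pvFillDown_snoc (lo : Int) (q : Nat) (h : 1  ≤ q) :
    pvFillDown lo (lo + 60 * q) [] =
      pvFillDown (lo + 60) (lo + 60 * q) [] ++ [(lo + 60, [], [])] := by
  induction q with
  | zero => omega
  | succ n ih =>
    by_cases hn : 1 ≤ n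
    · have h1 : lo + 60 * (↑(n+1) : Int) > lo := by push_cast; omega
      have h2 : lo + 60 * (↑(n+1) : Int) > lo + 60 := by push_cast; omega
      rw [pvFillDown, if_pos h1, pvFillDown_acc]
      conv_rhs => rw [pvFillDown, if_pos h2, pvFillDown_acc]
      have he : lo + 60 * ((n:Int)+1) - 60 = lo + 60 * (n:Int) := by ring
      push_cast
      rw [he, ih hn]
      simp
    · have hn0 : n = 0 := by omega
      subst hn0
      have he : lo + 60 * ((0 + 1 : Nat) : Int) = lo + 60 := by push_cast; ring
      rw [he, pvFillDown, if_pos (by omega), pvFillDown, if_neg (by omega),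
          pvFillDown, if_neg (by omega)]
lemma pvFillDown_nil (lo f : Int) (h : f ≤ lo) : pvFillDown lo f [] = [] := by
  rw [pvFillDown, if_neg (by omega)]

-- A's ascending fill equals the reverse of B's descending fill with the floor-division top
lemma fillUp_eq_fillDown (bound prev : Int) :
    pvFillUp bound prev =
      (pvFillDown prev (prev + 60 * PySem.Int.floordiv (bound - prev - 1) 60) []).reverse := by
  by_cases hb : bound - prev > 60
  · have hd := PySem.Int.floordiv_mul_add_mod (bound - prev - 1) 60
    have h0 : 0 ≤ PySem.Int.mod (bound - prev - 1) 60 := PySem.Int.mod_nonneg _ (by omega)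
    have h1 : PySem.Int.mod (bound - prev - 1) 60 < 60 := PySem.Int.mod_lt _ (by omega)
    set q := PySem.Int.floordiv (bound - prev - 1) 60 with hq
    have hq1 : 1 ≤ q := by omega
    have hq' : PySem.Int.floordiv (bound - (prev + 60) - 1) 60 = q - 1 := by
      rw [PySem.Int.floordiv_eq_iff_of_pos (by omega)]
      constructor <;> nlinarith
    rw [pvFillUp, if_pos hb, fillUp_eq_fillDown bound (prev + 60), hq']
    have hcast : prev + 60 * q = prev + 60 * ((q.toNat : Int)) := by omega
    have hcast2 : prev + 60 + 60 * (q - 1) = prev + 60 * ((q.toNat : Int)) := by ring_nf; omega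
    rw [hcast2, hcast, pvFillDown_snoc prev q.toNat (by omega)]
    simp
  · have hle : PySem.Int.floordiv (bound - prev - 1) 60 ≤ 0 := by
      have hd := PySem.Int.floordiv_mul_add_mod (bound - prev - 1) 60
      have h0 : 0 ≤ PySem.Int.mod (bound - prev - 1) 60 := PySem.Int.mod_nonneg _ (by omega)
      omega
    rw [pvFillUp, if_neg hb, pvFillDown_nil _ _ (by omega)]
    simp
termination_by (bound - prev).toNat
decreasing_by omega

lemma fillDown_eq_rev (bound prev : Int) :
    pvFillDown prev (prev + 60 * PySem.Int.floordiv (bound - prev - 1) 60) [] =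
      (pvFillUp bound prev).reverse := by
  rw [fillUp_eq_fillDown]; simp

-- the forward "interleave gaps with entries" chain and the final timestamp (A's shape)
def pvChain (t : Int) (lst : List (Int × List Int × List Int)) : List (Int × List Int × List Int) :=
  match lst with
  | [] => []
  | l :: r => pvFillUp l.1 t ++ l :: pvChain l.1 r

def pvLastTs (t : Int) (lst : List (Int × List Int × List Int)) : Int :=
  match lst with
  | [] => t
  | l :: r => pvLastTs l.1 r

lemma foldA_eq_chain (lst : List (Int × List Int × List Int)) :
    ∀ (acc : List (Int × List Int × List Int)) (t : Int),
      lst.foldl (fun (st : List (Int × List Int × List Int) × Int) l =>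
        (st.1 ++ pvFillUp l.1 st.2 ++ [l], l.1)) (acc, t)
      = (acc ++ pvChain t lst, pvLastTs t lst) := by
  induction lst with
  | nil => intro acc t; simp [pvChain, pvLastTs]
  | cons l r ih =>
    intro acc t
    simp only [List.foldl_cons]
    rw [ih, pvChain, pvLastTs]
    simp

-- B's reverse fold: the forward meaning of the accumulated reversed list
def pvHeadTs (lst : List (Int × List Int × List Int)) (e : Int) : Int :=
  match lst with
  | [] => e
  | l :: _ => l.1

def pvTail (lst : List (Int × List Int × List Int)) (e : Int) : List (Int × List Int × List Int) :=
  match lst with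
  | [] => []
  | l :: r => l :: (pvChain l.1 r ++ pvFillUp e (pvLastTs l.1 r))

lemma pvTail_cons (l : Int × List Int × List Int) (r : List (Int × List Int × List Int)) (e : Int) :
    pvTail (l :: r) e = l :: (pvFillUp (pvHeadTs r e) l.1 ++ pvTail r e) := by
  cases r with
  | nil => simp [pvTail, pvHeadTs, pvChain, pvLastTs]
  | cons h r' => simp [pvTail, pvHeadTs, pvChain, pvLastTs]

lemma foldB_eq_tail (lst : List (Int × List Int × List Int)) (e : Int) :
    lst.reverse.foldl
      (fun (st : List (Int × List Int × List Int) × Int) l =>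
        (pvFillDown l.1 (l.1 + 60 * PySem.Int.floordiv (st.2 - l.1 - 1) 60) st.1 ++ [l], l.1))
      ([], e)
    = ((pvTail lst e).reverse, pvHeadTs lst e) := by
  rw [List.foldl_reverse]
  induction lst with
  | nil => simp [pvTail, pvHeadTs]
  | cons l r ih =>
    simp only [List.foldr_cons, ih]
    rw [pvFillDown_acc, fillDown_eq_rev (pvHeadTs r e) l.1, pvTail_cons]
    simp [pvHeadTs]

-- ===== VERDICT =====
theorem insert_empty_lists_spec : Claim_equal_insert_empty_lists := by
  intro s e lst _
  unfold Spec_insert_empty_lists insert_empty_lists_alt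
  rw [foldB_eq_tail]
  simp only
  rw [pvFillDown_acc, fillDown_eq_rev (pvHeadTs lst e) s]
  cases lst with
  | nil =>
    simp [insert_empty_lists, pvTail, pvHeadTs]
  | cons h rest =>
    simp only [insert_empty_lists, foldA_eq_chain, pvTail, pvHeadTs]
    simp
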